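-- pv_equiv track=rewrite | github.com/sammed979/Mumbai_Hacks_Code-Hunters | tools.py | symptom_tool
-- ===== SOURCE A (Python) =====
-- def symptom_tool(user_text):
--     """Extract symptoms from farmer's text"""
--     text = user_text.lower()
--
--     symptoms = {
--         "fever": "unknown",
--         "appetite": "unknown",
--         "cough": "unknown",
--         "nasal_discharge": "unknown",
--         "weakness": "unknown",
--         "digestive_issue": "unknown"
--     }
--
--     # Fever detection
--     if any(word in text for word in ["fever", "hot", "temperature", "गर्मी"]):
--         symptoms["fever"] = "yes"
--     elif "no fever" in text:
--         symptoms["fever"] = "no"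
--
--     # Appetite detection
--     if any(word in text for word in ["not eating", "stopped eating", "no appetite", "खाना नहीं"]):
--         symptoms["appetite"] = "stopped"
--     elif any(word in text for word in ["eating less", "low appetite"]):
--         symptoms["appetite"] = "low"
--     elif any(word in text for word in ["eating normal", "eating well"]):
--         symptoms["appetite"] = "normal"
--
--     # Cough detection
--     if any(word in text for word in ["cough", "coughing", "खांसी"]):
--         symptoms["cough"] = "yes"
--
--     # Nasal discharge
--     if any(word in text for word in ["nasal", "discharge", "runny nose", "mucus", "नाक"]):
--         symptoms["nasal_discharge"] = "yes"
--
--     # Weakness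
--     if any(word in text for word in ["weak", "lying down", "can't stand", "कमजोर"]):
--         symptoms["weakness"] = "yes"
--
--     # Digestive issues
--     if any(word in text for word in ["diarrhea", "loose stool", "bloat", "constipation", "दस्त"]):
--         symptoms["digestive_issue"] = "yes"
--
--     return symptoms
-- ===== SOURCE B (Python) =====
-- # Inverted keyword index: one flat pass over (keyword, symptom, rank, value) records,
-- # keeping the best (lowest-rank) matched rule per symptom, then emit in fixed order.
-- KEYWORD_INDEX = [
--     ("fever", "fever", 0, "yes"),
--     ("hot", "fever", 0, "yes"),
--     ("temperature", "fever", 0, "yes"),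
--     ("गर्मी", "fever", 0, "yes"),
--     ("no fever", "fever", 1, "no"),
--     ("not eating", "appetite", 0, "stopped"),
--     ("stopped eating", "appetite", 0, "stopped"),
--     ("no appetite", "appetite", 0, "stopped"),
--     ("खाना नहीं", "appetite", 0, "stopped"),
--     ("eating less", "appetite", 1, "low"),
--     ("low appetite", "appetite", 1, "low"),
--     ("eating normal", "appetite", 2, "normal"),
--     ("eating well", "appetite", 2, "normal"),
--     ("cough", "cough", 0, "yes"),
--     ("coughing", "cough", 0, "yes"),
--     ("खांसी", "cough", 0, "yes"),
--     ("nasal", "nasal_discharge", 0, "yes"),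
--     ("discharge", "nasal_discharge", 0, "yes"),
--     ("runny nose", "nasal_discharge", 0, "yes"),
--     ("mucus", "nasal_discharge", 0, "yes"),
--     ("नाक", "nasal_discharge", 0, "yes"),
--     ("weak", "weakness", 0, "yes"),
--     ("lying down", "weakness", 0, "yes"),
--     ("can't stand", "weakness", 0, "yes"),
--     ("कमजोर", "weakness", 0, "yes"),
--     ("diarrhea", "digestive_issue", 0, "yes"),
--     ("loose stool", "digestive_issue", 0, "yes"),
--     ("bloat", "digestive_issue", 0, "yes"),
--     ("constipation", "digestive_issue", 0, "yes"),
--     ("दस्त", "digestive_issue", 0, "yes"),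
-- ]
--
-- ORDER = ["fever", "appetite", "cough", "nasal_discharge", "weakness", "digestive_issue"]
--
-- def symptom_tool(user_text):
--     text = user_text.lower()
--     best = {}
--     for kw, sym, rank, val in KEYWORD_INDEX:
--         if kw in text and (sym not in best or rank < best[sym][0]):
--             best[sym] = (rank, val)
--     return {s: (best[s][1] if s in best else "unknown") for s in ORDER}
-- ===== Notes on version B (the rewrite author's own statement) =====
-- stated objective: alternative
-- what changed: Replaces A's six per-symptom if/elif blocks with an inverted keyword index: one flat pass over (keyword, symptom, rank, value) records that keeps the lowest-rank matched rule per symptom in an accumulator dict, then emits the six symptoms in fixed order with a default for unmatched symptoms.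
import Mathlib
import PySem

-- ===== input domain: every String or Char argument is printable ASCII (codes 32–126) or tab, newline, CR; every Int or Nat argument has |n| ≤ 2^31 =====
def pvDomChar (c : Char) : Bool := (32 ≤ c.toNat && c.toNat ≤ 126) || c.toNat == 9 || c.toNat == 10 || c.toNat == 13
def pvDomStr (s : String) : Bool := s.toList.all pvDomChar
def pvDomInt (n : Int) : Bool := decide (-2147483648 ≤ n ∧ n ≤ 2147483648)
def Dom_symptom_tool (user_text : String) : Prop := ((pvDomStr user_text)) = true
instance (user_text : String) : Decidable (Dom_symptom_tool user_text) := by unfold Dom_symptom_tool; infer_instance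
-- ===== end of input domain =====

-- B replaces A's six per-symptom if/elif blocks by one flat pass over an inverted keyword index
-- keeping the best (lowest-rank) matched rule per symptom (objective: alternative); same return value.

-- ===== PORT A =====
def symptom_tool (user_text : String) : List (String × String) :=
  let text := PySem.Str.lower user_text
  let symptoms : PySem.Dict String String := PySem.Dict.ofList
    [("fever", "unknown"), ("appetite", "unknown"), ("cough", "unknown"),
     ("nasal_discharge", "unknown"), ("weakness", "unknown"), ("digestive_issue", "unknown")]
  -- Fever detection
  let symptoms :=
    if ["fever", "hot", "temperature", "गर्मी"].any (fun word => PySem.Str.isIn word text) then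
      symptoms.insert "fever" "yes"
    else if PySem.Str.isIn "no fever" text then
      symptoms.insert "fever" "no"
    else symptoms
  -- Appetite detection
  let symptoms :=
    if ["not eating", "stopped eating", "no appetite", "खाना नहीं"].any (fun word => PySem.Str.isIn word text) then
      symptoms.insert "appetite" "stopped"
    else if ["eating less", "low appetite"].any (fun word => PySem.Str.isIn word text) then
      symptoms.insert "appetite" "low"
    else if ["eating normal", "eating well"].any (fun word => PySem.Str.isIn word text) then
      symptoms.insert "appetite" "normal"
    else symptoms
  -- Cough detection
  let symptoms :=
    if ["cough", "coughing", "खांसी"].any (fun word => PySem.Str.isIn word text) then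
      symptoms.insert "cough" "yes"
    else symptoms
  -- Nasal discharge
  let symptoms :=
    if ["nasal", "discharge", "runny nose", "mucus", "नाक"].any (fun word => PySem.Str.isIn word text) then
      symptoms.insert "nasal_discharge" "yes"
    else symptoms
  -- Weakness
  let symptoms :=
    if ["weak", "lying down", "can't stand", "कमजोर"].any (fun word => PySem.Str.isIn word text) then
      symptoms.insert "weakness" "yes"
    else symptoms
  -- Digestive issues
  let symptoms :=
    if ["diarrhea", "loose stool", "bloat", "constipation", "दस्त"].any (fun word => PySem.Str.isIn word text) then
      symptoms.insert "digestive_issue" "yes"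
    else symptoms
  symptoms.items

-- ===== PORT B =====
-- KEYWORD_INDEX: flat list of (keyword, (symptom, (rank, value))) records
def pvKeywordIndex : List (String × String × Int × String) :=
  [("fever", "fever", 0, "yes"), ("hot", "fever", 0, "yes"),
   ("temperature", "fever", 0, "yes"), ("गर्मी", "fever", 0, "yes"),
   ("no fever", "fever", 1, "no"),
   ("not eating", "appetite", 0, "stopped"), ("stopped eating", "appetite", 0, "stopped"),
   ("no appetite", "appetite", 0, "stopped"), ("खाना नहीं", "appetite", 0, "stopped"),
   ("eating less", "appetite", 1, "low"), ("low appetite", "appetite", 1, "low"),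
   ("eating normal", "appetite", 2, "normal"), ("eating well", "appetite", 2, "normal"),
   ("cough", "cough", 0, "yes"), ("coughing", "cough", 0, "yes"), ("खांसी", "cough", 0, "yes"),
   ("nasal", "nasal_discharge", 0, "yes"), ("discharge", "nasal_discharge", 0, "yes"),
   ("runny nose", "nasal_discharge", 0, "yes"), ("mucus", "nasal_discharge", 0, "yes"),
   ("नाक", "nasal_discharge", 0, "yes"),
   ("weak", "weakness", 0, "yes"), ("lying down", "weakness", 0, "yes"),
   ("can't stand", "weakness", 0, "yes"), ("कमजोर", "weakness", 0, "yes"),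
   ("diarrhea", "digestive_issue", 0, "yes"), ("loose stool", "digestive_issue", 0, "yes"),
   ("bloat", "digestive_issue", 0, "yes"), ("constipation", "digestive_issue", 0, "yes"),
   ("दस्त", "digestive_issue", 0, "yes")]

def pvOrder : List String :=
  ["fever", "appetite", "cough", "nasal_discharge", "weakness", "digestive_issue"]

-- the loop body: keep the record iff its keyword matches and it beats the current best rank
def pvStep (text : String) (b : PySem.Dict String (Int × String))
    (e : String × String × Int × String) : PySem.Dict String (Int × String) :=
  if PySem.Str.isIn e.1 text &&
     (match b.get? e.2.1 with | none => true | some p => decide (e.2.2.1 < p.1)) then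
    b.insert e.2.1 e.2.2
  else b

def symptom_tool_alt (user_text : String) : List (String × String) :=
  let text := PySem.Str.lower user_text
  let best := pvKeywordIndex.foldl (pvStep text) PySem.Dict.empty
  pvOrder.map (fun s => (s, match best.get? s with | some p => p.2 | none => "unknown"))

-- ===== PRECONDITION & SPEC =====
def Spec_symptom_tool (user_text : String) (out : List (String × String)) : Prop := out = symptom_tool_alt user_text
instance (user_text : String) (out : List (String × String)) : Decidable (Spec_symptom_tool user_text out) := by unfold Spec_symptom_tool; infer_instance

-- ===== CLAIM (what is proved, stated in full; the proofs are below) =====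
def Claim_equal_symptom_tool : Prop := ∀ (user_text : String), Dom_symptom_tool user_text → Spec_symptom_tool user_text (symptom_tool user_text)

-- ===== LEMMAS AND PROOFS =====

-- A's control flow with each substring test abstracted to a Bool
def pvA (f1 f2 a1 a2 a3 c n w d : Bool) : List (String × String) :=
  let symptoms : PySem.Dict String String := PySem.Dict.ofList
    [("fever", "unknown"), ("appetite", "unknown"), ("cough", "unknown"),
     ("nasal_discharge", "unknown"), ("weakness", "unknown"), ("digestive_issue", "unknown")]
  let symptoms :=
    if f1 then symptoms.insert "fever" "yes"
    else if f2 then symptoms.insert "fever" "no"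
    else symptoms
  let symptoms :=
    if a1 then symptoms.insert "appetite" "stopped"
    else if a2 then symptoms.insert "appetite" "low"
    else if a3 then symptoms.insert "appetite" "normal"
    else symptoms
  let symptoms := if c then symptoms.insert "cough" "yes" else symptoms
  let symptoms := if n then symptoms.insert "nasal_discharge" "yes" else symptoms
  let symptoms := if w then symptoms.insert "weakness" "yes" else symptoms
  let symptoms := if d then symptoms.insert "digestive_issue" "yes" else symptoms
  symptoms.items

lemma pvA_eq : ∀ f1 f2 a1 a2 a3 c n w d : Bool, pvA f1 f2 a1 a2 a3 c n w d =
    [("fever", if f1 then "yes" else if f2 then "no" else "unknown"),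
     ("appetite", if a1 then "stopped" else if a2 then "low" else if a3 then "normal" else "unknown"),
     ("cough", if c then "yes" else "unknown"),
     ("nasal_discharge", if n then "yes" else "unknown"),
     ("weakness", if w then "yes" else "unknown"),
     ("digestive_issue", if d then "yes" else "unknown")] := by decide

-- the per-key shadow of pvStep: same decision, state restricted to one symptom's entry
def pvStep1 (text : String) (o : Option (Int × String))
    (e : String × String × Int × String) : Option (Int × String) :=
  if PySem.Str.isIn e.1 text &&
     (match o with | none => true | some p => decide (e.2.2.1 < p.1)) then
    some e.2.2
  else o

lemma pvStep_get_self (text : String) (b : PySem.Dict String (Int × String))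
    (e : String × String × Int × String) :
    (pvStep text b e).get? e.2.1 = pvStep1 text (b.get? e.2.1) e := by
  unfold pvStep pvStep1
  by_cases hc : (PySem.Str.isIn e.1 text &&
      (match b.get? e.2.1 with | none => true | some p => decide (e.2.2.1 < p.1))) = true
  · rw [if_pos hc, if_pos hc, PySem.Dict.get?_insert_self]
  · rw [if_neg hc, if_neg hc]

lemma pvStep_get_ne (text : String) (b : PySem.Dict String (Int × String))
    (e : String × String × Int × String) (s : String) (h : e.2.1 ≠ s) :
    (pvStep text b e).get? s = b.get? s := by
  unfold pvStep
  by_cases hc : (PySem.Str.isIn e.1 text &&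
      (match b.get? e.2.1 with | none => true | some p => decide (e.2.2.1 < p.1))) = true
  · rw [if_pos hc]
    exact PySem.Dict.get?_insert_of_ne _ _ (Ne.symm h)
  · rw [if_neg hc]

-- decompose the dict fold by key: get? s only sees the records whose symptom is s
lemma pv_fold_get (text : String) (s : String) :
    ∀ (l : List (String × String × Int × String)) (b : PySem.Dict String (Int × String)),
    ((l.foldl (pvStep text) b).get? s)
      = (l.filter (fun e => e.2.1 == s)).foldl (pvStep1 text) (b.get? s) := by
  intro l
  induction l with
  | nil => intro b; rfl
  | cons e l ih =>
    intro b
    simp only [List.foldl_cons, List.filter_cons]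
    by_cases hs : e.2.1 = s
    · subst hs
      simp only [beq_self_eq_true, if_true]
      rw [ih, pvStep_get_self, List.foldl_cons]
    · have hbe : (e.2.1 == s) = false := by simp [hs]
      rw [hbe]
      simp only [Bool.false_eq_true, if_false]
      rw [ih, pvStep_get_ne text b e s hs]

-- once a rule of rank r is recorded, no later rule of rank ≥ r replaces it
lemma pv_fold_stay (text : String) (r : Int) (v : String) :
    ∀ (l : List (String × String × Int × String)), (∀ e ∈ l, r ≤ e.2.2.1) →
    l.foldl (pvStep1 text) (some (r, v)) = some (r, v) := by
  intro l
  induction l with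
  | nil => intro _; rfl
  | cons e l ih =>
    intro h
    have he : r ≤ e.2.2.1 := h e (List.mem_cons_self ..)
    have hd : decide (e.2.2.1 < r) = false := by
      simp only [decide_eq_false_iff_not, not_lt]; exact he
    simp only [List.foldl_cons, pvStep1, hd, Bool.and_false, Bool.false_eq_true, if_false]
    exact ih (fun e' he' => h e' (List.mem_cons_of_mem _ he'))

-- a uniform-rank group from the empty state: first match wins, the rest of the group is inert
lemma pv_fold_group (text : String) (sym : String) (r : Int) (v : String) :
    ∀ (ks : List String),
    (ks.map (fun k => (k, sym, r, v))).foldl (pvStep1 text) none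
      = if ks.any (fun k => PySem.Str.isIn k text) then some (r, v) else none := by
  intro ks
  induction ks with
  | nil => rfl
  | cons k ks ih =>
    simp only [List.map_cons, List.foldl_cons, List.any_cons]
    by_cases hk : PySem.Str.isIn k text = true
    · have h1 : pvStep1 text none (k, sym, r, v) = some (r, v) := by
        simp only [pvStep1, hk, Bool.true_and]
        exact if_pos trivial
      rw [h1, pv_fold_stay text r v _ ?stay]
      · have hc : ((PySem.Str.isIn k text || ks.any fun k => PySem.Str.isIn k text) = true) := by
          rw [hk, Bool.true_or]
        rw [if_pos hc]
      case stay =>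
        intro e he
        obtain ⟨k', _, rfl⟩ := List.mem_map.mp he
        exact le_refl r
    · have hkf : PySem.Str.isIn k text = false := by simpa using hk
      have h1 : pvStep1 text none (k, sym, r, v) = none := by
        simp only [pvStep1, hkf, Bool.false_and, Bool.false_eq_true, if_false]
      rw [h1, ih]
      simp only [hkf, Bool.false_or]

-- closed form of the fever fold: rank-0 "yes" group, then the rank-1 "no" rule
lemma pv_fold_fever (text : String) :
    [("fever", "fever", (0:Int), "yes"), ("hot", "fever", 0, "yes"),
     ("temperature", "fever", 0, "yes"), ("गर्मी", "fever", 0, "yes"),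
     ("no fever", "fever", 1, "no")].foldl (pvStep1 text) none
    = (if ["fever", "hot", "temperature", "गर्मी"].any (fun k => PySem.Str.isIn k text)
         then some ((0:Int), "yes")
       else if PySem.Str.isIn "no fever" text then some ((1:Int), "no") else none) := by
  have hsplit : ([("fever", "fever", (0:Int), "yes"), ("hot", "fever", 0, "yes"),
      ("temperature", "fever", 0, "yes"), ("गर्मी", "fever", 0, "yes"),
      ("no fever", "fever", 1, "no")] : List (String × String × Int × String))
      = (["fever", "hot", "temperature", "गर्मी"].map (fun k => (k, "fever", (0:Int), "yes")))
        ++ [("no fever", "fever", 1, "no")] := rfl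
  rw [hsplit, List.foldl_append, pv_fold_group]
  by_cases h1 : (["fever", "hot", "temperature", "गर्मी"].any (fun k => PySem.Str.isIn k text)) = true
  · rw [if_pos h1, if_pos h1]
    exact pv_fold_stay text 0 "yes" _ (by intro e he; fin_cases he; norm_num)
  · rw [if_neg h1, if_neg h1]
    simp only [List.foldl_cons, List.foldl_nil, pvStep1]
    by_cases h2 : PySem.Str.isIn "no fever" text = true
    · simp only [h2, Bool.true_and]
    · have h2f : PySem.Str.isIn "no fever" text = false := by simpa using h2
      simp only [h2f, Bool.false_and, Bool.false_eq_true, if_false]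

-- closed form of the appetite fold: three groups of ranks 0, 1, 2
lemma pv_fold_appetite (text : String) :
    [("not eating", "appetite", (0:Int), "stopped"), ("stopped eating", "appetite", 0, "stopped"),
     ("no appetite", "appetite", 0, "stopped"), ("खाना नहीं", "appetite", 0, "stopped"),
     ("eating less", "appetite", 1, "low"), ("low appetite", "appetite", 1, "low"),
     ("eating normal", "appetite", 2, "normal"), ("eating well", "appetite", 2, "normal")].foldl
      (pvStep1 text) none
    = (if ["not eating", "stopped eating", "no appetite", "खाना नहीं"].any (fun k => PySem.Str.isIn k text)
         then some ((0:Int), "stopped")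
       else if ["eating less", "low appetite"].any (fun k => PySem.Str.isIn k text)
         then some ((1:Int), "low")
       else if ["eating normal", "eating well"].any (fun k => PySem.Str.isIn k text)
         then some ((2:Int), "normal")
       else none) := by
  have hsplit : ([("not eating", "appetite", (0:Int), "stopped"), ("stopped eating", "appetite", 0, "stopped"),
      ("no appetite", "appetite", 0, "stopped"), ("खाना नहीं", "appetite", 0, "stopped"),
      ("eating less", "appetite", 1, "low"), ("low appetite", "appetite", 1, "low"),
      ("eating normal", "appetite", 2, "normal"), ("eating well", "appetite", 2, "normal")] :
        List (String × String × Int × String))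
      = (["not eating", "stopped eating", "no appetite", "खाना नहीं"].map
           (fun k => (k, "appetite", (0:Int), "stopped")))
        ++ ((["eating less", "low appetite"].map (fun k => (k, "appetite", (1:Int), "low")))
        ++ (["eating normal", "eating well"].map (fun k => (k, "appetite", (2:Int), "normal")))) := rfl
  rw [hsplit, List.foldl_append, List.foldl_append, pv_fold_group]
  by_cases h1 : (["not eating", "stopped eating", "no appetite", "खाना नहीं"].any
      (fun k => PySem.Str.isIn k text)) = true
  · rw [if_pos h1, if_pos h1,
      pv_fold_stay text 0 "stopped" _ (by intro e he; fin_cases he <;> norm_num),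
      pv_fold_stay text 0 "stopped" _ (by intro e he; fin_cases he <;> norm_num)]
  · rw [if_neg h1, if_neg h1, pv_fold_group]
    by_cases h2 : (["eating less", "low appetite"].any (fun k => PySem.Str.isIn k text)) = true
    · rw [if_pos h2, if_pos h2]
      exact pv_fold_stay text 1 "low" _ (by intro e he; fin_cases he <;> norm_num)
    · rw [if_neg h2, if_neg h2, pv_fold_group]

-- ===== VERDICT (by name: the statement is the Claim_ definition above) =====
theorem symptom_tool_spec : Claim_equal_symptom_tool := by
  intro t _
  show symptom_tool t = symptom_tool_alt t
  have hA : symptom_tool t = pvA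
      (["fever", "hot", "temperature", "गर्मी"].any (fun k => PySem.Str.isIn k (PySem.Str.lower t)))
      (PySem.Str.isIn "no fever" (PySem.Str.lower t))
      (["not eating", "stopped eating", "no appetite", "खाना नहीं"].any (fun k => PySem.Str.isIn k (PySem.Str.lower t)))
      (["eating less", "low appetite"].any (fun k => PySem.Str.isIn k (PySem.Str.lower t)))
      (["eating normal", "eating well"].any (fun k => PySem.Str.isIn k (PySem.Str.lower t)))
      (["cough", "coughing", "खांसी"].any (fun k => PySem.Str.isIn k (PySem.Str.lower t)))
      (["nasal", "discharge", "runny nose", "mucus", "नाक"].any (fun k => PySem.Str.isIn k (PySem.Str.lower t)))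
      (["weak", "lying down", "can't stand", "कमजोर"].any (fun k => PySem.Str.isIn k (PySem.Str.lower t)))
      (["diarrhea", "loose stool", "bloat", "constipation", "दस्त"].any (fun k => PySem.Str.isIn k (PySem.Str.lower t))) := rfl
  rw [hA, pvA_eq]
  have hfilt1 : pvKeywordIndex.filter (fun e => e.2.1 == "fever")
      = [("fever", "fever", (0:Int), "yes"), ("hot", "fever", 0, "yes"),
         ("temperature", "fever", 0, "yes"), ("गर्मी", "fever", 0, "yes"),
         ("no fever", "fever", 1, "no")] := rfl
  have hfilt2 : pvKeywordIndex.filter (fun e => e.2.1 == "appetite")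
      = [("not eating", "appetite", (0:Int), "stopped"), ("stopped eating", "appetite", 0, "stopped"),
         ("no appetite", "appetite", 0, "stopped"), ("खाना नहीं", "appetite", 0, "stopped"),
         ("eating less", "appetite", 1, "low"), ("low appetite", "appetite", 1, "low"),
         ("eating normal", "appetite", 2, "normal"), ("eating well", "appetite", 2, "normal")] := rfl
  have hfilt3 : pvKeywordIndex.filter (fun e => e.2.1 == "cough")
      = ["cough", "coughing", "खांसी"].map (fun k => (k, "cough", (0:Int), "yes")) := rfl
  have hfilt4 : pvKeywordIndex.filter (fun e => e.2.1 == "nasal_discharge")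
      = ["nasal", "discharge", "runny nose", "mucus", "नाक"].map
          (fun k => (k, "nasal_discharge", (0:Int), "yes")) := rfl
  have hfilt5 : pvKeywordIndex.filter (fun e => e.2.1 == "weakness")
      = ["weak", "lying down", "can't stand", "कमजोर"].map
          (fun k => (k, "weakness", (0:Int), "yes")) := rfl
  have hfilt6 : pvKeywordIndex.filter (fun e => e.2.1 == "digestive_issue")
      = ["diarrhea", "loose stool", "bloat", "constipation", "दस्त"].map
          (fun k => (k, "digestive_issue", (0:Int), "yes")) := rfl
  simp only [symptom_tool_alt, pvOrder, List.map_cons, List.map_nil]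
  rw [pv_fold_get, pv_fold_get, pv_fold_get, pv_fold_get, pv_fold_get, pv_fold_get,
    hfilt1, hfilt2, hfilt3, hfilt4, hfilt5, hfilt6]
  simp only [PySem.Dict.get?_empty]
  rw [pv_fold_fever, pv_fold_appetite, pv_fold_group, pv_fold_group, pv_fold_group, pv_fold_group]
  simp only [apply_ite (fun o : Option (Int × String) =>
    (match o with | some p => p.2 | none => "unknown"))]
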